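-- pv_equiv track=rewrite | github.com/michal-minich/wheatley | src/wheatley/memory.py | _render_auto_memory_unclamped
-- ===== SOURCE A (Python) =====
-- from typing import Callable, Dict, List, Optional
--
-- SECTION_TITLES = {
--     "stable_user_facts": "Stable User Facts",
--     "preferences": "Preferences",
--     "current_projects": "Current Projects",
--     "recent_context": "Recent Context",
-- }
--
-- def _render_auto_memory_unclamped(
--     sections: Dict[str, List[str]], updated_at: str
-- ) -> str:
--     lines = [
--         "# Wheatley Auto Memory",
--         "",
--         "Generated from conversation history. Manual memories remain in memory.md.",
--         f"Updated: {updated_at}",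
--     ]
--     for key, title in SECTION_TITLES.items():
--         lines.extend(["", f"## {title}"])
--         values = sections.get(key, [])
--         lines.extend(f"- {value}" for value in values or ["None yet."])
--     return "\n".join(lines).rstrip() + "\n"
-- ===== SOURCE B (Python) =====
-- from typing import Dict, List
--
--
-- def _render_auto_memory_unclamped(
--     sections: Dict[str, List[str]], updated_at: str
-- ) -> str:
--     # Straight-line template: the section table is unrolled into literal text;
--     # each section body is rendered by one helper as a single string.
--     def body(key: str) -> str:
--         return "".join("\n- " + v for v in (sections.get(key, []) or ["None yet."]))
--
--     text = (
--         "# Wheatley Auto Memory\n"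
--         "\n"
--         "Generated from conversation history. Manual memories remain in memory.md.\n"
--         "Updated: " + updated_at +
--         "\n\n## Stable User Facts" + body("stable_user_facts") +
--         "\n\n## Preferences" + body("preferences") +
--         "\n\n## Current Projects" + body("current_projects") +
--         "\n\n## Recent Context" + body("recent_context")
--     )
--     return text.rstrip() + "\n"
-- ===== Notes on version B (the rewrite author's own statement) =====
-- stated objective: alternative
-- what changed: B drops the section-title table and the line-list accumulation entirely: the loop over SECTION_TITLES is unrolled into one straight-line string template with the four titles as literals, and each section body is produced as a single string by a helper instead of extending a shared lines list.
import Mathlib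
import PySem

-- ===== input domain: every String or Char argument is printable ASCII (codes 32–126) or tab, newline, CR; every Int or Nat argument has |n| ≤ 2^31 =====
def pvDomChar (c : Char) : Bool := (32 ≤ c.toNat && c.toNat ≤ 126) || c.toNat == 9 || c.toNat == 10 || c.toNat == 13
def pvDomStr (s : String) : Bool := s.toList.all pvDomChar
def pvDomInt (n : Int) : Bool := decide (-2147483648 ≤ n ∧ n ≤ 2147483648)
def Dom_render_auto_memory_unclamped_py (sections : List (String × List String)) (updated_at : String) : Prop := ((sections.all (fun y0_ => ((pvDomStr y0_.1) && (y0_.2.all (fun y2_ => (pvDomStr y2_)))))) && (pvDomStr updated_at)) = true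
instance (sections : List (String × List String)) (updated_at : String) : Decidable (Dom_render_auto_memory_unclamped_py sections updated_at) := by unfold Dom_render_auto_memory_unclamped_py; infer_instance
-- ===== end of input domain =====

-- B unrolls the loop over the fixed SECTION_TITLES table into one straight-line string template
-- (titles as literals, each section body built directly as a string), instead of A's accumulated
-- line list joined at the end; same output (alternative decomposition).

-- ===== PORT A =====
-- module-level constant SECTION_TITLES of A's module
def SECTION_TITLES : PySem.Dict String String :=
  PySem.Dict.ofList
    [("stable_user_facts", "Stable User Facts"),
     ("preferences", "Preferences"),
     ("current_projects", "Current Projects"),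
     ("recent_context", "Recent Context")]

-- Python's `values or ["None yet."]`: an empty list is falsy
def pyOrList (vs dflt : List String) : List String := if vs.isEmpty then dflt else vs

def render_auto_memory_unclamped_py (sections : List (String × List String)) (updated_at : String) : String :=
  let lines : List String :=
    ["# Wheatley Auto Memory",
     "",
     "Generated from conversation history. Manual memories remain in memory.md.",
     "Updated: " ++ updated_at]
  let lines := SECTION_TITLES.items.foldl
    (fun ls kt =>
      (ls ++ ["", "## " ++ kt.2]) ++
        (pyOrList ((PySem.Dict.mk sections).getD kt.1 []) ["None yet."]).map (fun v => "- " ++ v))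
    lines
  PySem.Str.rstrip (PySem.Str.join "\n" lines) ++ "\n"

-- ===== PORT B =====
-- `"".join("\n- " + v for v in (sections.get(key, []) or ["None yet."]))`
def pvBody (sections : List (String × List String)) (key : String) : String :=
  PySem.Str.join ""
    ((pyOrList ((PySem.Dict.mk sections).getD key []) ["None yet."]).map (fun v => "\n- " ++ v))

def render_auto_memory_unclamped_py_alt (sections : List (String × List String)) (updated_at : String) : String :=
  let text :=
    "# Wheatley Auto Memory\n" ++
    "\n" ++
    "Generated from conversation history. Manual memories remain in memory.md.\n" ++
    "Updated: " ++ updated_at ++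
    "\n\n## Stable User Facts" ++ pvBody sections "stable_user_facts" ++
    "\n\n## Preferences" ++ pvBody sections "preferences" ++
    "\n\n## Current Projects" ++ pvBody sections "current_projects" ++
    "\n\n## Recent Context" ++ pvBody sections "recent_context"
  PySem.Str.rstrip text ++ "\n"

-- ===== PRECONDITION & SPEC =====
def Spec_render_auto_memory_unclamped_py (sections : List (String × List String)) (updated_at : String) (out : String) : Prop := out = render_auto_memory_unclamped_py_alt sections updated_at
instance (sections : List (String × List String)) (updated_at : String) (out : String) : Decidable (Spec_render_auto_memory_unclamped_py sections updated_at out) := by unfold Spec_render_auto_memory_unclamped_py; infer_instance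

-- ===== CLAIM (what is proved, stated in full; the proofs are below) =====
def Claim_equal_render_auto_memory_unclamped_py : Prop := ∀ (sections : List (String × List String)) (updated_at : String), Dom_render_auto_memory_unclamped_py sections updated_at → Spec_render_auto_memory_unclamped_py sections updated_at (render_auto_memory_unclamped_py sections updated_at)

-- ===== LEMMAS AND PROOFS =====

lemma sjoin_singleton (sep x : String) : PySem.Str.join sep [x] = x := by
  apply String.toList_inj.mp
  simp [PySem.Str.toList_join, PySem.Chars.join_singleton]

lemma sjoin_cons_cons (sep a b : String) (l : List String) :
    PySem.Str.join sep (a :: b :: l) = a ++ sep ++ PySem.Str.join sep (b :: l) := by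
  apply String.toList_inj.mp
  simp [PySem.Str.toList_join, PySem.Chars.join_cons_cons]

lemma sjoin_append (sep : String) (xs ys : List String) (hx : xs ≠ []) (hy : ys ≠ []) :
    PySem.Str.join sep (xs ++ ys) = PySem.Str.join sep xs ++ sep ++ PySem.Str.join sep ys := by
  induction xs with
  | nil => exact absurd rfl hx
  | cons a xs' ih =>
    cases xs' with
    | nil =>
      cases ys with
      | nil => exact absurd rfl hy
      | cons y ys' => rw [List.singleton_append, sjoin_cons_cons, sjoin_singleton]
    | cons b xs'' =>
      rw [List.cons_append, List.cons_append, sjoin_cons_cons, ← List.cons_append,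
        ih (by simp), sjoin_cons_cons]
      apply String.toList_inj.mp
      simp [String.toList_append]

lemma sjoin_nil (sep : String) : PySem.Str.join sep [] = "" := by
  apply String.toList_inj.mp
  simp [PySem.Str.toList_join, PySem.Chars.join, List.intercalate]

lemma sjoin_cons_empty (x : String) (l : List String) :
    PySem.Str.join "" (x :: l) = x ++ PySem.Str.join "" l := by
  cases l with
  | nil =>
    rw [sjoin_singleton, sjoin_nil]
    apply String.toList_inj.mp
    simp
  | cons y l' =>
    rw [sjoin_cons_cons]
    apply String.toList_inj.mp
    simp [String.toList_append]

-- dashed lines joined with "\n" after a head = the head followed by "\n- v" pieces glued directly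
lemma dash_lines (h : String) (vs : List String) :
    PySem.Str.join "\n" (h :: vs.map (fun v => "- " ++ v)) =
      h ++ PySem.Str.join "" (vs.map (fun v => "\n- " ++ v)) := by
  induction vs generalizing h with
  | nil =>
    rw [List.map_nil, sjoin_singleton, List.map_nil, sjoin_nil]
    apply String.toList_inj.mp
    simp
  | cons v rest ih =>
    rw [List.map_cons, sjoin_cons_cons, ih ("- " ++ v), List.map_cons, sjoin_cons_empty]
    apply String.toList_inj.mp
    simp

-- one fold step of A, read as a string: append "\n\n## title" and the dashed body
lemma secstep (acc : List String) (hacc : acc ≠ []) (t : String) (vs : List String) :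
    PySem.Str.join "\n" ((acc ++ ["", "## " ++ t]) ++ vs.map (fun v => "- " ++ v)) =
      PySem.Str.join "\n" acc ++ "\n\n## " ++ t ++
        PySem.Str.join "" (vs.map (fun v => "\n- " ++ v)) := by
  rw [List.append_assoc, List.cons_append, List.singleton_append,
    sjoin_append "\n" acc _ hacc (by simp), sjoin_cons_cons, dash_lines]
  apply String.toList_inj.mp
  simp [String.toList_append]

-- the four header lines joined with "\n", as B's template writes them
lemma header_join (u : String) :
    PySem.Str.join "\n"
      ["# Wheatley Auto Memory", "",
       "Generated from conversation history. Manual memories remain in memory.md.",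
       "Updated: " ++ u] =
    "# Wheatley Auto Memory\n" ++ "\n" ++
      "Generated from conversation history. Manual memories remain in memory.md.\n" ++
      "Updated: " ++ u := by
  rw [sjoin_cons_cons, sjoin_cons_cons, sjoin_cons_cons, sjoin_singleton]
  apply String.toList_inj.mp
  simp [String.toList_append]

-- ===== VERDICT (by name: the statement is the Claim_ definition above) =====
set_option maxRecDepth 8192 in
theorem render_auto_memory_unclamped_py_spec : Claim_equal_render_auto_memory_unclamped_py := by
  intro sections updated_at _
  unfold Spec_render_auto_memory_unclamped_py render_auto_memory_unclamped_py
    render_auto_memory_unclamped_py_alt pvBody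
  have hitems : SECTION_TITLES.items =
      [("stable_user_facts", "Stable User Facts"),
       ("preferences", "Preferences"),
       ("current_projects", "Current Projects"),
       ("recent_context", "Recent Context")] := by decide
  rw [hitems]
  dsimp only [List.foldl_cons, List.foldl_nil]
  rw [secstep _ (by simp), secstep _ (by simp), secstep _ (by simp), secstep _ (by simp),
    header_join]
  apply congrArg (fun s => PySem.Str.rstrip s ++ "\n")
  apply String.toList_inj.mp
  simp [String.toList_append]
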